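-- pv_equiv track=rewrite | github.com/JoshiArchit/CSCI724-Course_Project | property_name_match.py | match_property_names
-- ===== SOURCE A (Python) =====
-- def compare_dicts(dict1, dict2):
--     """
--     This function compares the keys of the parameters in the post requests of
--     doc_1 against the keys of the parameters in the get requests of doc_2. If the
--     keys of the post parameters are exactly the same as the keys of the get
--     parameters, return True
--     :param dict1: post request dictionary
--     :param dict2: get request dictionary
--     :return: True if the keys of the post parameters are exactly the same as the keys of the get parameters
--     """
--     # if the keys of dict1 are exactly the same as the keys of
--     # dict2, return True
--     if dict1.keys() == dict2.keys():
--         return True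
--
-- def match_property_names(doc_1, doc_2):
--     """
--     This function compares the names of the properties of the parameters
--     in the post requests of doc_1 against the names of the properties
--     of the parameters in doc_2
--     :param doc_1: first API description
--     :param doc_2: second API description
--     :return:
--     """
--     total_match_count = 0
--
--     for method_type in doc_1:
--         for operation_type in doc_1[method_type]:
--             if "post" in operation_type:
--                 post_parameters = doc_1[method_type][operation_type]
--                 for method_type_2 in doc_2:
--                     for operation_type_2 in doc_2[method_type_2]:
--                         if "get" in operation_type_2:
--                             get_parameters = doc_2[method_type_2][operation_type_2]
--                             # compare the keys of the post parameters with the keys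
--                             # of the get parameters
--                             # if all the keys of the post parameters are in the get
--                             # parameters, increment the match count by 1
--                             if compare_dicts(post_parameters, get_parameters):
--                                 total_match_count += 1
--     return total_match_count
-- ===== SOURCE B (Python) =====
-- def match_property_names(doc_1, doc_2):
--     # Index get operations of doc_2 by the frozenset of their parameter keys,
--     # then each post operation of doc_1 is a single dictionary lookup.
--     counts = {}
--     for methods in doc_2.values():
--         for op_name, params in methods.items():
--             if "get" in op_name:
--                 key = frozenset(params)
--                 counts[key] = counts.get(key, 0) + 1
--     total = 0
--     for methods in doc_1.values():
--         for op_name, params in methods.items():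
--             if "post" in op_name:
--                 total += counts.get(frozenset(params), 0)
--     return total
-- ===== Notes on version B (the rewrite author's own statement) =====
-- stated objective: alternative
-- what changed: Replaces the all-pairs scan (every post operation re-scans every get operation of doc_2 comparing key-sets) with a one-pass index: get operations are counted once in a dict keyed by the frozenset of their parameter keys, and each post operation becomes a single lookup (not measurably faster on the generated input family, where building the documents dominates).
import Mathlib
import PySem

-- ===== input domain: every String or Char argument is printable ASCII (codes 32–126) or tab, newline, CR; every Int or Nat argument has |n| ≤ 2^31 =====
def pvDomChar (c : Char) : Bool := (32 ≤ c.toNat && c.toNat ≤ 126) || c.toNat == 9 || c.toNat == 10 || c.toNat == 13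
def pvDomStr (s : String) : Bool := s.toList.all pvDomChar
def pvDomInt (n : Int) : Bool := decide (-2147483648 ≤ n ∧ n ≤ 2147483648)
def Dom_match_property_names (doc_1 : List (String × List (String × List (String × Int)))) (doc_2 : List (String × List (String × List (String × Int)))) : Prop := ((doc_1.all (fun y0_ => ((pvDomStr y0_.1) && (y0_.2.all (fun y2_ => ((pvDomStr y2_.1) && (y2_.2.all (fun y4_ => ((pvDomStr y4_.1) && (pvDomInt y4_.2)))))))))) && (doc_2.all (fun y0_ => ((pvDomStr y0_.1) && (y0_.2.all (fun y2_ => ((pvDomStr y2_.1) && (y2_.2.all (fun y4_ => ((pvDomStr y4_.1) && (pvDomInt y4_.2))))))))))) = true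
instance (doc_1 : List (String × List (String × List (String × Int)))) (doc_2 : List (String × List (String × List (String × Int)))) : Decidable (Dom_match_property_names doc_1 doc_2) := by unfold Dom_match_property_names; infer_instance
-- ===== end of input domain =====

-- B replaces A's all-pairs key-set comparison by a one-pass count dict keyed by the canonical
-- (frozenset) form of each get operation's parameter keys; each post is then a single lookup.

-- ===== PORT A =====
-- nested 'for … in dict' loops over the dict views; dict1.keys() == dict2.keys() is set equality
def match_property_names (doc_1 : List (String × List (String × List (String × Int)))) (doc_2 : List (String × List (String × List (String × Int)))) : Int :=
  (PySem.Dict.ofList doc_1).items.foldl (fun acc mt =>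
    (PySem.Dict.ofList mt.2).items.foldl (fun acc op =>
      if PySem.Str.isIn "post" op.1 then
        (PySem.Dict.ofList doc_2).items.foldl (fun acc mt2 =>
          (PySem.Dict.ofList mt2.2).items.foldl (fun acc op2 =>
            if PySem.Str.isIn "get" op2.1 then
              -- compare_dicts: dict.keys() == dict.keys(), i.e. equality as sets
              if PySem.Set.equal (PySem.Dict.ofList op.2).keys (PySem.Dict.ofList op2.2).keys then acc + 1
              else acc
            else acc) acc) acc
      else acc) acc) 0

-- ===== PORT B =====
-- frozenset(params) is modelled exactly by the sorted list of the dict's (nodup) keys: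
-- two frozensets are equal iff the sorted nodup key lists are equal
def pvFrozen (params : List (String × Int)) : List String :=
  PySem.List.sorted (PySem.Dict.ofList params).keys (fun x => x) false

def match_property_names_alt (doc_1 : List (String × List (String × List (String × Int)))) (doc_2 : List (String × List (String × List (String × Int)))) : Int :=
  let counts : PySem.Dict (List String) Int :=
    (PySem.Dict.ofList doc_2).items.foldl (fun cnts mt2 =>
      (PySem.Dict.ofList mt2.2).items.foldl (fun cnts op2 =>
        if PySem.Str.isIn "get" op2.1 then
          cnts.insert (pvFrozen op2.2) (cnts.getD (pvFrozen op2.2) 0 + 1)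
        else cnts) cnts) PySem.Dict.empty
  (PySem.Dict.ofList doc_1).items.foldl (fun acc mt =>
    (PySem.Dict.ofList mt.2).items.foldl (fun acc op =>
      if PySem.Str.isIn "post" op.1 then acc + counts.getD (pvFrozen op.2) 0
      else acc) acc) 0

-- ===== PRECONDITION & SPEC =====
def Spec_match_property_names (doc_1 : List (String × List (String × List (String × Int)))) (doc_2 : List (String × List (String × List (String × Int)))) (out : Int) : Prop := out = match_property_names_alt doc_1 doc_2
instance (doc_1 : List (String × List (String × List (String × Int)))) (doc_2 : List (String × List (String × List (String × Int)))) (out : Int) : Decidable (Spec_match_property_names doc_1 doc_2 out) := by unfold Spec_match_property_names; infer_instance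

-- ===== CLAIM (what is proved, stated in full; the proofs are below) =====
def Claim_equal_match_property_names : Prop := ∀ (doc_1 : List (String × List (String × List (String × Int)))) (doc_2 : List (String × List (String × List (String × Int)))), Dom_match_property_names doc_1 doc_2 → Spec_match_property_names doc_1 doc_2 (match_property_names doc_1 doc_2)

-- ===== LEMMAS AND PROOFS =====

-- a conditional-step fold is a fold over the filtered, projected list
theorem pv_foldl_if_filter_map {α β σ : Type} (l : List α) (p : α → Bool) (k : α → β)
    (step : σ → β → σ) (s : σ) :
    l.foldl (fun c x => if p x then step c (k x) else c) s
      = ((l.filter p).map k).foldl step s := by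
  induction l generalizing s with
  | nil => rfl
  | cons a t ih => by_cases h : p a = true <;> simp [h, ih]

-- the list of get-operation key lists of doc_2
def pvGets (doc_2 : List (String × List (String × List (String × Int)))) : List (List String) :=
  (PySem.Dict.ofList doc_2).items.flatMap (fun mt2 =>
    (((PySem.Dict.ofList mt2.2).items.filter (fun op2 => PySem.Str.isIn "get" op2.1)).map
      (fun op2 => (PySem.Dict.ofList op2.2).keys)))

theorem pvGets_nodup (doc_2 : List (String × List (String × List (String × Int)))) :
    ∀ g ∈ pvGets doc_2, g.Nodup := by
  intro g hg
  simp only [pvGets, List.mem_flatMap, List.mem_map, List.mem_filter] at hg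
  obtain ⟨mt2, _, op2, _, rfl⟩ := hg
  exact PySem.Dict.nodup_keys_ofList _

-- set equality of nodup key lists is equality of their sorted forms
theorem pv_equal_eq_sorted {s t : List String} (hs : s.Nodup) (ht : t.Nodup) :
    PySem.Set.equal s t
      = (PySem.List.sorted s (fun x => x) false == PySem.List.sorted t (fun x => x) false) := by
  rcases h : PySem.Set.equal s t with _ | _
  · symm; rw [beq_eq_false_iff_ne]
    intro hsort
    rw [PySem.List.sorted_id_eq_sorted_id_iff_perm] at hsort
    have := (PySem.Set.equal_iff s t).mpr ((List.perm_ext_iff_of_nodup hs ht).mp hsort)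
    simp [h] at this
  · symm; rw [beq_iff_eq, PySem.List.sorted_id_eq_sorted_id_iff_perm]
    exact (List.perm_ext_iff_of_nodup hs ht).mpr (fun a => (PySem.Set.equal_iff s t).mp h a)

-- A equals the per-post count over the flattened get list
theorem pvA_eq (doc_1 doc_2 : List (String × List (String × List (String × Int)))) :
    match_property_names doc_1 doc_2
      = (PySem.Dict.ofList doc_1).items.foldl (fun acc mt =>
          (PySem.Dict.ofList mt.2).items.foldl (fun acc op =>
            if PySem.Str.isIn "post" op.1 then
              acc + ((pvGets doc_2).countP
                      (fun gk => PySem.Set.equal (PySem.Dict.ofList op.2).keys gk) : Int)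
            else acc) acc) 0 := by
  unfold match_property_names
  apply PySem.List.foldl_congr_mem; intro acc mt _
  apply PySem.List.foldl_congr_mem; intro acc op _
  by_cases hp : PySem.Str.isIn "post" op.1 = true
  · simp only [hp, if_true, pvGets]
    rw [← PySem.List.foldl_count_if, List.foldl_flatMap]
    apply PySem.List.foldl_congr_mem; intro acc2 mt2 _
    rw [pv_foldl_if_filter_map _
          (fun op2 : String × List (String × Int) => PySem.Str.isIn "get" op2.1)
          (fun op2 : String × List (String × Int) => (PySem.Dict.ofList op2.2).keys)
          (fun (a : Int) gk => if PySem.Set.equal (PySem.Dict.ofList op.2).keys gk then a + 1 else a)]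
  · rw [if_neg hp, if_neg hp]

-- B's count dict counts each canonical key-set's occurrences in the gets of doc_2
theorem pvB_counts (doc_2 : List (String × List (String × List (String × Int)))) (c : List String) :
    ((PySem.Dict.ofList doc_2).items.foldl (fun cnts mt2 =>
      (PySem.Dict.ofList mt2.2).items.foldl (fun cnts op2 =>
        if PySem.Str.isIn "get" op2.1 then
          cnts.insert (pvFrozen op2.2) (cnts.getD (pvFrozen op2.2) 0 + 1)
        else cnts) cnts) PySem.Dict.empty).getD c 0
      = (((pvGets doc_2).map (fun g => PySem.List.sorted g (fun x => x) false)).count c : Int) := by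
  have hshape : ∀ (d : PySem.Dict (List String) Int),
      (PySem.Dict.ofList doc_2).items.foldl (fun cnts mt2 =>
        (PySem.Dict.ofList mt2.2).items.foldl (fun cnts op2 =>
          if PySem.Str.isIn "get" op2.1 then
            cnts.insert (pvFrozen op2.2) (cnts.getD (pvFrozen op2.2) 0 + 1)
          else cnts) cnts) d
        = ((pvGets doc_2).map (fun g => PySem.List.sorted g (fun x => x) false)).foldl
            (fun d x => d.insert x (d.getD x 0 + 1)) d := by
    intro d
    simp only [pvGets, List.map_flatMap, List.foldl_flatMap]
    apply PySem.List.foldl_congr_mem; intro acc mt2 _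
    rw [pv_foldl_if_filter_map _
          (fun op2 : String × List (String × Int) => PySem.Str.isIn "get" op2.1)
          (fun op2 : String × List (String × Int) => pvFrozen op2.2)
          (fun (d : PySem.Dict (List String) Int) x => d.insert x (d.getD x 0 + 1))]
    simp [List.map_map, pvFrozen, Function.comp_def]
  rw [hshape, PySem.Dict.getD_foldl_insert_add_one]
  simp [PySem.Dict.getD_empty]

theorem match_property_names_eq_alt (doc_1 doc_2 : List (String × List (String × List (String × Int)))) :
    match_property_names doc_1 doc_2 = match_property_names_alt doc_1 doc_2 := by
  rw [pvA_eq]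
  unfold match_property_names_alt
  apply PySem.List.foldl_congr_mem; intro acc mt _
  apply PySem.List.foldl_congr_mem; intro acc op _
  by_cases hp : PySem.Str.isIn "post" op.1 = true
  · simp only [hp, if_true, pvB_counts]
    congr 1
    rw [List.count_eq_countP, List.countP_map]
    congr 1
    apply List.countP_congr
    intro gk hgk
    rw [pv_equal_eq_sorted (PySem.Dict.nodup_keys_ofList _) (pvGets_nodup doc_2 gk hgk)]
    simp [pvFrozen, Function.comp, BEq.comm]
  · rw [if_neg hp, if_neg hp]

-- ===== VERDICT (by name: the statement is the Claim_ definition above) =====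
theorem match_property_names_spec : Claim_equal_match_property_names := by
  intro doc_1 doc_2 _
  exact match_property_names_eq_alt doc_1 doc_2
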